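-- pv_equiv track=rewrite | github.com/balelulelo/Graph-Theory-Assignment-W7 | knight.py | create_custom_graph
-- ===== SOURCE A (Python) =====
-- def create_custom_graph(n, m):
--     custom_moves = [(2, -1), (1, -2), (-1, -2), (-2, -1), (-2, 1), (-1, 2), (1, 2), (2, 1)]
--     graph = {}
--
--     for i in range(n):
--         for j in range(m):
--             neighbors = []
--             for move in custom_moves:
--                 new_x, new_y = i + move[0], j + move[1]
--                 if 0 <= new_x < n and 0 <= new_y < m:
--                     neighbors.append((new_x, new_y))
--             graph[(i, j)] = neighbors
--
--     return graph
-- ===== SOURCE B (Python) =====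
-- def create_custom_graph(n, m):
--     custom_moves = [(2, -1), (1, -2), (-1, -2), (-2, -1), (-2, 1), (-1, 2), (1, 2), (2, 1)]
--     rows = [[[] for _ in range(m)] for _ in range(n)]
--     for dx, dy in custom_moves:
--         js = range(max(0, -dy), min(m, m - dy))
--         for i in range(max(0, -dx), min(n, n - dx)):
--             row = rows[i]
--             for j in js:
--                 row[j].append((i + dx, j + dy))
--     return {(i, j): rows[i][j] for i in range(n) for j in range(m)}
-- ===== Notes on version B (the rewrite author's own statement) =====
-- stated objective: alternative
-- what changed: Instead of testing all 8 moves per cell, B pre-initialises every cell's list and then, move-major, computes for each move the sub-rectangle of sources valid for it and appends without any per-cell bounds test.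
import Mathlib
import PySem

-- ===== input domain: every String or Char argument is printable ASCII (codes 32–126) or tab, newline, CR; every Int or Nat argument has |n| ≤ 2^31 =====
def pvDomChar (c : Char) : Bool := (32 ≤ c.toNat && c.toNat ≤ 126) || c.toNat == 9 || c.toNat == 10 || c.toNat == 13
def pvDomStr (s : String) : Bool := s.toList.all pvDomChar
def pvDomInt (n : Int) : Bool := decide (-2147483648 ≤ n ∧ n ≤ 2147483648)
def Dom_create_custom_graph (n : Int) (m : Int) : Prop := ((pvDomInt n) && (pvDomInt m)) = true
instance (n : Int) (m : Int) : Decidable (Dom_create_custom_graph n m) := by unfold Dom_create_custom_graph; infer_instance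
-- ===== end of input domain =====

-- B builds the adjacency lists move-major: a grid of per-cell lists, and for each of the 8 moves the
-- sub-rectangle of sources valid for that move, appending without any per-cell bounds test or dict
-- lookup in the hot loop; the dict is assembled once at the end.

-- ===== PORT A =====
def pvMovesA : List (Int × Int) := [(2, -1), (1, -2), (-1, -2), (-2, -1), (-2, 1), (-1, 2), (1, 2), (2, 1)]

-- graph[(i, j)] = neighbors always stores a FRESH key, so the dict is its items list built by appending
def create_custom_graph (n : Int) (m : Int) : List (Int × Int × List (Int × Int)) :=
  (PySem.List.pyRange 0 n 1).foldl (fun g i =>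
    (PySem.List.pyRange 0 m 1).foldl (fun g j =>
      let neighbors := pvMovesA.foldl (fun acc mv =>
        if 0 ≤ i + mv.1 ∧ i + mv.1 < n ∧ 0 ≤ j + mv.2 ∧ j + mv.2 < m then
          acc ++ [(i + mv.1, j + mv.2)]
        else acc) []
      g ++ [(i, j, neighbors)]) g) []

-- ===== PORT B =====
-- The Python lists of lists 'rows' (mutated in place by rows[i][j].append) are ported as Arrays,
-- Lean's constant-time in-place sequence, updated with Array.modify at the same (always in-range,
-- nonnegative) indices i and j and read back with Array.getD (the index is always in range, so the
-- default is never used). The final dict comprehension stores a fresh key per cell, so it is its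
-- items list in iteration order.
def create_custom_graph_alt (n : Int) (m : Int) : List (Int × Int × List (Int × Int)) :=
  let rows : Array (Array (List (Int × Int))) :=
    ((PySem.List.pyRange 0 n 1).map (fun _ =>
      ((PySem.List.pyRange 0 m 1).map (fun _ => ([] : List (Int × Int)))).toArray)).toArray
  let rows := ([(2, -1), (1, -2), (-1, -2), (-2, -1), (-2, 1), (-1, 2), (1, 2), (2, 1)] : List (Int × Int)).foldl
    (fun rows mv =>
      let js := PySem.List.pyRange (max 0 (-mv.2)) (min m (m - mv.2)) 1
      (PySem.List.pyRange (max 0 (-mv.1)) (min n (n - mv.1)) 1).foldl (fun rows i =>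
        rows.modify i.toNat (fun row =>
          js.foldl (fun row j =>
            row.modify j.toNat (fun cell => cell ++ [(i + mv.1, j + mv.2)])) row)) rows) rows
  (PySem.List.pyRange 0 n 1).foldl (fun g i =>
    (PySem.List.pyRange 0 m 1).foldl (fun g j =>
      g ++ [(i, j, (rows.getD i.toNat #[]).getD j.toNat [])]) g) []

-- ===== PRECONDITION & SPEC =====
def Spec_create_custom_graph (n : Int) (m : Int) (out : List (Int × Int × List (Int × Int))) : Prop := out = create_custom_graph_alt n m
instance (n : Int) (m : Int) (out : List (Int × Int × List (Int × Int))) : Decidable (Spec_create_custom_graph n m out) := by unfold Spec_create_custom_graph; infer_instance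

-- ===== CLAIM (what is proved, stated in full; the proofs are below) =====
def Claim_equal_create_custom_graph : Prop := ∀ (n : Int) (m : Int), Dom_create_custom_graph n m → Spec_create_custom_graph n m (create_custom_graph n m)

-- ===== LEMMAS AND PROOFS =====

-- the cells (i, j) in row-major order
def pvCells (n m : Int) : List (Int × Int) :=
  (PySem.List.pyRange 0 n 1) ×ˢ (PySem.List.pyRange 0 m 1)

-- A's per-cell neighbour list
def pvNb (n m : Int) (c : Int × Int) : List (Int × Int) :=
  (pvMovesA.filter (fun mv =>
      decide (0 ≤ c.1 + mv.1 ∧ c.1 + mv.1 < n ∧ 0 ≤ c.2 + mv.2 ∧ c.2 + mv.2 < m))).map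
    (fun mv => (c.1 + mv.1, c.2 + mv.2))

def pvCellsMap (n m : Int) (f : Int × Int → List (Int × Int)) : List (Int × Int × List (Int × Int)) :=
  (pvCells n m).map (fun c => (c.1, c.2, f c))

-- B's grid of per-cell lists, as a function of the per-cell content
def pvRowsMap (n m : Int) (f : Int × Int → List (Int × Int)) : List (List (List (Int × Int))) :=
  (PySem.List.pyRange 0 n 1).map (fun i => (PySem.List.pyRange 0 m 1).map (fun j => f (i, j)))

-- a nested i/j fold is the fold over the cartesian product list
theorem pv_foldl_prod {α β γ : Type} (la : List α) (lb : List β) (step : γ → α × β → γ)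
    (init : γ) :
    la.foldl (fun g i => lb.foldl (fun g j => step g (i, j)) g) init
      = (la ×ˢ lb).foldl step init := by
  induction la generalizing init with
  | nil => rfl
  | cons a la ih => simp [List.product_cons, List.foldl_append, List.foldl_map, ih]

-- Prop-conditioned form of PySem.List.foldl_append_if (the library lemma states the Bool form)
theorem pv_foldl_append_if_prop {α β : Type} (P : α → Prop) [DecidablePred P] (f : α → β)
    (l : List α) (init : List β) :
    l.foldl (fun acc x => if P x then acc ++ [f x] else acc) init
      = init ++ (l.filter (fun x => decide (P x))).map f := by
  have h := PySem.List.foldl_append_if (fun x => decide (P x)) f l init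
  simpa using h

theorem pv_A_char (n m : Int) :
    create_custom_graph n m = pvCellsMap n m (pvNb n m) := by
  unfold create_custom_graph pvCellsMap pvCells pvNb
  rw [pv_foldl_prod (PySem.List.pyRange 0 n 1) (PySem.List.pyRange 0 m 1)
      (fun g c => g ++ [(c.1, c.2,
        pvMovesA.foldl (fun acc mv =>
          if 0 ≤ c.1 + mv.1 ∧ c.1 + mv.1 < n ∧ 0 ≤ c.2 + mv.2 ∧ c.2 + mv.2 < m then
            acc ++ [(c.1 + mv.1, c.2 + mv.2)]
          else acc) [])]) []]
  rw [PySem.List.foldl_append_singleton_eq_map]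
  simp only [List.nil_append]
  refine List.map_congr_left (fun c _ => ?_)
  rw [pv_foldl_append_if_prop
      (fun mv : Int × Int => 0 ≤ c.1 + mv.1 ∧ c.1 + mv.1 < n ∧ 0 ≤ c.2 + mv.2 ∧ c.2 + mv.2 < m)
      (fun mv => (c.1 + mv.1, c.2 + mv.2)) pvMovesA []]
  simp

-- List.modify on a map over a range, as the map of a pointwise update
theorem pv_modify_map_range {β : Type} (a b : Int) (F : Int → β) (k : Nat) (g : β → β) :
    ((PySem.List.pyRange a b 1).map F).modify k g
      = (PySem.List.pyRange a b 1).map (fun x => if x = a + (k : Int) then g (F x) else F x) := by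
  apply List.ext_getElem
  · simp
  · intro t h1 h2
    rw [List.getElem_modify]
    simp only [List.getElem_map, PySem.List.getElem_pyRange_one]
    rcases eq_or_ne k t with h | h
    · simp [h]
    · have : ¬(a + (t : Int) = a + (k : Int)) := by omega
      simp [h, this]

-- folding in-place updates at a duplicate-free list of nonnegative indices updates each listed index once
theorem pv_fold_modify {β : Type} (c : Int) (xs : List Int) (hnn : ∀ x ∈ xs, 0 ≤ x)
    (hnd : xs.Nodup) (F : Int → β) (g : Int → β → β) :
    xs.foldl (fun l x => l.modify x.toNat (g x)) ((PySem.List.pyRange 0 c 1).map F)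
      = (PySem.List.pyRange 0 c 1).map (fun y => if y ∈ xs then g y (F y) else F y) := by
  induction xs generalizing F with
  | nil => simp
  | cons x xs ih =>
    have hx : (0 : Int) + (x.toNat : Int) = x := by
      have := hnn x (List.mem_cons_self ..); omega
    have hxs : x ∉ xs := (List.nodup_cons.mp hnd).1
    rw [List.foldl_cons, pv_modify_map_range 0 c F x.toNat (g x),
      ih (fun y hy => hnn y (List.mem_cons_of_mem _ hy)) (List.nodup_cons.mp hnd).2]
    simp only [hx]
    refine List.map_congr_left (fun y _ => ?_)
    by_cases h : y = x
    · subst h; simp [hxs]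
    · simp [h, List.mem_cons]

-- one move's rectangle pass over the grid appends its target exactly at the cells it is valid for
theorem pv_move_fold (n m dx dy : Int) (f : Int × Int → List (Int × Int)) :
    (PySem.List.pyRange (max 0 (-dx)) (min n (n - dx)) 1).foldl (fun rows i =>
        rows.modify i.toNat (fun row =>
          (PySem.List.pyRange (max 0 (-dy)) (min m (m - dy)) 1).foldl (fun row j =>
            row.modify j.toNat (fun cell => cell ++ [(i + dx, j + dy)])) row)) (pvRowsMap n m f)
      = pvRowsMap n m (fun c => f c ++
          if 0 ≤ c.1 + dx ∧ c.1 + dx < n ∧ 0 ≤ c.2 + dy ∧ c.2 + dy < m then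
            [(c.1 + dx, c.2 + dy)] else []) := by
  have hinn : ∀ x ∈ PySem.List.pyRange (max 0 (-dx)) (min n (n - dx)) 1, (0 : Int) ≤ x := by
    intro x hx; rw [PySem.List.mem_pyRange_one] at hx; omega
  unfold pvRowsMap
  rw [pv_fold_modify n _ hinn (PySem.List.nodup_pyRange_one _ _)
      (fun i => (PySem.List.pyRange 0 m 1).map (fun j => f (i, j)))
      (fun i row =>
        (PySem.List.pyRange (max 0 (-dy)) (min m (m - dy)) 1).foldl (fun row j =>
          row.modify j.toNat (fun cell => cell ++ [(i + dx, j + dy)])) row)]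
  refine List.map_congr_left (fun i hi => ?_)
  rw [PySem.List.mem_pyRange_one] at hi
  by_cases hmi : i ∈ PySem.List.pyRange (max 0 (-dx)) (min n (n - dx)) 1
  · have hib : max 0 (-dx) ≤ i ∧ i < min n (n - dx) := PySem.List.mem_pyRange_one.mp hmi
    have hjnn : ∀ x ∈ PySem.List.pyRange (max 0 (-dy)) (min m (m - dy)) 1, (0 : Int) ≤ x := by
      intro x hx; rw [PySem.List.mem_pyRange_one] at hx; omega
    rw [if_pos hmi,
      pv_fold_modify m _ hjnn (PySem.List.nodup_pyRange_one _ _)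
        (fun j => f (i, j)) (fun j cell => cell ++ [(i + dx, j + dy)])]
    refine List.map_congr_left (fun j hj => ?_)
    rw [PySem.List.mem_pyRange_one] at hj
    by_cases hmj : j ∈ PySem.List.pyRange (max 0 (-dy)) (min m (m - dy)) 1
    · have hjb := PySem.List.mem_pyRange_one.mp hmj
      have : 0 ≤ i + dx ∧ i + dx < n ∧ 0 ≤ j + dy ∧ j + dy < m := by omega
      simp [hmj, this]
    · have hjb : ¬(max 0 (-dy) ≤ j ∧ j < min m (m - dy)) := fun h =>
        hmj (PySem.List.mem_pyRange_one.mpr h)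
      have : ¬(0 ≤ i + dx ∧ i + dx < n ∧ 0 ≤ j + dy ∧ j + dy < m) := by omega
      simp [hmj, this]
  · have hib : ¬(max 0 (-dx) ≤ i ∧ i < min n (n - dx)) := fun h =>
      hmi (PySem.List.mem_pyRange_one.mpr h)
    rw [if_neg hmi]
    refine (List.map_congr_left (fun j hj => ?_)).symm
    rw [PySem.List.mem_pyRange_one] at hj
    have : ¬(0 ≤ i + dx ∧ i + dx < n ∧ 0 ≤ j + dy ∧ j + dy < m) := by omega
    simp [this]

-- folding the whole move list accumulates, per cell, the valid moves' targets in move order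
theorem pv_rows_fold (n m : Int) (ms : List (Int × Int)) (f : Int × Int → List (Int × Int)) :
    ms.foldl (fun rows mv =>
        (PySem.List.pyRange (max 0 (-mv.1)) (min n (n - mv.1)) 1).foldl (fun rows i =>
          rows.modify i.toNat (fun row =>
            (PySem.List.pyRange (max 0 (-mv.2)) (min m (m - mv.2)) 1).foldl (fun row j =>
              row.modify j.toNat (fun cell => cell ++ [(i + mv.1, j + mv.2)])) row)) rows)
        (pvRowsMap n m f)
      = pvRowsMap n m (fun c => f c ++
          ((ms.filter (fun mv =>
              decide (0 ≤ c.1 + mv.1 ∧ c.1 + mv.1 < n ∧ 0 ≤ c.2 + mv.2 ∧ c.2 + mv.2 < m))).map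
            (fun mv => (c.1 + mv.1, c.2 + mv.2)))) := by
  induction ms generalizing f with
  | nil => simp [pvRowsMap]
  | cons mv ms ih =>
    rw [List.foldl_cons, pv_move_fold n m mv.1 mv.2 f, ih]
    unfold pvRowsMap
    refine List.map_congr_left (fun i _ => ?_)
    refine List.map_congr_left (fun j _ => ?_)
    by_cases h : (0 ≤ i + mv.1 ∧ i + mv.1 < n ∧ 0 ≤ j + mv.2 ∧ j + mv.2 < m)
    · simp [h]
    · simp [h]

-- Array.getD is List.getD on the underlying list
theorem pv_arr_getD {β : Type} (a : Array β) (k : Nat) (d : β) :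
    a.getD k d = a.toList.getD k d := by
  rw [Array.getD_eq_getD_getElem?, ← Array.getElem?_toList, List.getD_eq_getElem?_getD]

-- List.modify commutes with List.map along a pointwise-commuting pair of updates
theorem pv_map_modify {β γ : Type} (f : β → γ) (l : List β) (k : Nat) (g : β → β) (g' : γ → γ)
    (h : ∀ b, f (g b) = g' (f b)) :
    (l.modify k g).map f = (l.map f).modify k g' := by
  apply List.ext_getElem
  · simp
  · intro t h1 h2
    rw [List.getElem_map, List.getElem_modify, List.getElem_modify]
    by_cases hk : k = t
    · simp [hk, h]
    · simp [hk]

-- an index-fold of Array.modify is, on toList, the same fold of List.modify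
theorem pv_arr_fold_toList {β : Type} (g : Int → β → β) (js : List Int) (row : Array β) :
    (js.foldl (fun row j => row.modify j.toNat (g j)) row).toList
      = js.foldl (fun l j => l.modify j.toNat (g j)) row.toList := by
  induction js generalizing row with
  | nil => rfl
  | cons j js ih => rw [List.foldl_cons, List.foldl_cons, ih, Array.toList_modify]

-- the same, one level up: through toList.map f for corresponding element updates
theorem pv_arr_fold_map {β γ : Type} (upd : Int → β → β) (updL : Int → γ → γ) (f : β → γ)
    (h : ∀ x b, f (upd x b) = updL x (f b)) (xs : List Int) (a : Array β) :
    (xs.foldl (fun a x => a.modify x.toNat (upd x)) a).toList.map f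
      = xs.foldl (fun l x => l.modify x.toNat (updL x)) (a.toList.map f) := by
  induction xs generalizing a with
  | nil => rfl
  | cons x xs ih =>
    rw [List.foldl_cons, List.foldl_cons, ih, Array.toList_modify,
      pv_map_modify f _ _ _ (updL x) (h x)]

-- the whole Array-level move fold, observed through toList.map Array.toList, is the List-level one
theorem pv_bridge (n m : Int) (ms : List (Int × Int)) (rows : Array (Array (List (Int × Int)))) :
    (ms.foldl (fun rows mv =>
        (PySem.List.pyRange (max 0 (-mv.1)) (min n (n - mv.1)) 1).foldl (fun rows i =>
          rows.modify i.toNat (fun row =>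
            (PySem.List.pyRange (max 0 (-mv.2)) (min m (m - mv.2)) 1).foldl (fun row j =>
              row.modify j.toNat (fun cell => cell ++ [(i + mv.1, j + mv.2)])) row)) rows)
      rows).toList.map Array.toList
      = ms.foldl (fun rows mv =>
          (PySem.List.pyRange (max 0 (-mv.1)) (min n (n - mv.1)) 1).foldl (fun rows i =>
            rows.modify i.toNat (fun row =>
              (PySem.List.pyRange (max 0 (-mv.2)) (min m (m - mv.2)) 1).foldl (fun row j =>
                row.modify j.toNat (fun cell => cell ++ [(i + mv.1, j + mv.2)])) row)) rows)
          (rows.toList.map Array.toList) := by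
  induction ms generalizing rows with
  | nil => rfl
  | cons mv ms ih =>
    rw [List.foldl_cons, List.foldl_cons, ih,
      pv_arr_fold_map
        (fun i row =>
          (PySem.List.pyRange (max 0 (-mv.2)) (min m (m - mv.2)) 1).foldl (fun row j =>
            row.modify j.toNat (fun cell => cell ++ [(i + mv.1, j + mv.2)])) row)
        (fun i l =>
          (PySem.List.pyRange (max 0 (-mv.2)) (min m (m - mv.2)) 1).foldl (fun l j =>
            l.modify j.toNat (fun cell => cell ++ [(i + mv.1, j + mv.2)])) l)
        Array.toList
        (fun i row => pv_arr_fold_toList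
          (fun j cell => cell ++ [(i + mv.1, j + mv.2)]) _ row)]

-- reading the finished grid back, cell by cell, in row-major order
theorem pv_assemble (n m : Int) (rowsArr : Array (Array (List (Int × Int))))
    (f : Int × Int → List (Int × Int))
    (hrows : rowsArr.toList.map Array.toList = pvRowsMap n m f) :
    (PySem.List.pyRange 0 n 1).foldl (fun g i =>
        (PySem.List.pyRange 0 m 1).foldl (fun g j =>
          g ++ [(i, j, (rowsArr.getD i.toNat #[]).getD j.toNat [])]) g) []
      = pvCellsMap n m f := by
  unfold pvCellsMap pvCells
  rw [pv_foldl_prod (PySem.List.pyRange 0 n 1) (PySem.List.pyRange 0 m 1)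
      (fun g c => g ++ [(c.1, c.2, (rowsArr.getD c.1.toNat #[]).getD c.2.toNat [])]) []]
  rw [PySem.List.foldl_append_singleton_eq_map]
  simp only [List.nil_append]
  refine List.map_congr_left (fun c hc => ?_)
  obtain ⟨i, j⟩ := c
  rcases List.mem_product.mp hc with ⟨h1, h2⟩
  rw [PySem.List.mem_pyRange_one] at h1 h2
  have hsz : rowsArr.toList.length = (n - 0).toNat := by
    have hl := congrArg List.length hrows
    unfold pvRowsMap at hl
    simpa [PySem.List.length_pyRange_one] using hl
  have hi : i.toNat < rowsArr.toList.length := by omega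
  have h3 : rowsArr.getD i.toNat #[] = rowsArr.toList[i.toNat] := by
    rw [pv_arr_getD, List.getD_eq_getElem?_getD, List.getElem?_eq_getElem hi]; rfl
  have h4 : rowsArr.toList[i.toNat].toList
      = (PySem.List.pyRange 0 m 1).map (fun j => f (i, j)) := by
    have : (rowsArr.toList.map Array.toList)[i.toNat]'(by simpa using hi)
        = (pvRowsMap n m f)[i.toNat]'(by rw [← hrows]; simpa using hi) := by
      exact List.getElem_of_eq hrows _
    rw [List.getElem_map] at this
    rw [this]
    unfold pvRowsMap
    rw [List.getElem_map, PySem.List.getElem_pyRange_one]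
    have hx : (0 : Int) + (i.toNat : Int) = i := by omega
    rw [hx]
  have hj : j.toNat < ((PySem.List.pyRange 0 m 1).map (fun j => f (i, j))).length := by
    rw [List.length_map, PySem.List.length_pyRange_one]; omega
  rw [h3, pv_arr_getD, h4, List.getD_eq_getElem?_getD, List.getElem?_eq_getElem hj]
  rw [List.getElem_map, PySem.List.getElem_pyRange_one]
  have hy : (0 : Int) + (j.toNat : Int) = j := by omega
  rw [hy]
  rfl

theorem pv_B_char (n m : Int) :
    create_custom_graph_alt n m = pvCellsMap n m (pvNb n m) := by
  show (PySem.List.pyRange 0 n 1).foldl (fun g i =>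
    (PySem.List.pyRange 0 m 1).foldl (fun g j =>
      g ++ [(i, j, ((([(2, -1), (1, -2), (-1, -2), (-2, -1), (-2, 1), (-1, 2), (1, 2), (2, 1)] : List (Int × Int)).foldl
          (fun rows mv =>
            (PySem.List.pyRange (max 0 (-mv.1)) (min n (n - mv.1)) 1).foldl (fun rows i =>
              rows.modify i.toNat (fun row =>
                (PySem.List.pyRange (max 0 (-mv.2)) (min m (m - mv.2)) 1).foldl (fun row j =>
                  row.modify j.toNat (fun cell => cell ++ [(i + mv.1, j + mv.2)])) row)) rows)
          (((PySem.List.pyRange 0 n 1).map (fun _ =>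
            ((PySem.List.pyRange 0 m 1).map (fun _ => ([] : List (Int × Int)))).toArray)).toArray)).getD
        i.toNat #[]).getD j.toNat [])]) g) [] = pvCellsMap n m (pvNb n m)
  refine pv_assemble n m _ (pvNb n m) ?_
  rw [pv_bridge]
  have h0 : ((((PySem.List.pyRange 0 n 1).map (fun _ =>
        ((PySem.List.pyRange 0 m 1).map (fun _ => ([] : List (Int × Int)))).toArray)).toArray).toList.map
          Array.toList)
      = pvRowsMap n m (fun _ => []) := by
    unfold pvRowsMap
    simp
  rw [h0, pv_rows_fold n m [(2, -1), (1, -2), (-1, -2), (-2, -1), (-2, 1), (-1, 2), (1, 2), (2, 1)]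
      (fun _ => [])]
  unfold pvRowsMap
  refine List.map_congr_left (fun i _ => ?_)
  refine List.map_congr_left (fun j _ => ?_)
  simp [pvNb, pvMovesA]

-- ===== VERDICT (by name: the statement is the Claim_ definition above) =====
theorem create_custom_graph_spec : Claim_equal_create_custom_graph := by
  intro n m _
  unfold Spec_create_custom_graph
  rw [pv_A_char, pv_B_char]
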